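-- pv_equiv track=rewrite | github.com/jst0951/CodingTest | 프로그래머스/2/17683. ［3차］ 방금그곡/［3차］ 방금그곡.py | str_to_scale_list
-- ===== SOURCE A (Python) =====
-- def str_to_scale_list(scale_str):
--     scale_list = []
--     i = 0
--     while i < len(scale_str):
--         if i < (len(scale_str) - 1) and scale_str[i+1] == '#':
--             scale_list.append(scale_str[i:i+2])
--             i += 2
--         else:
--             scale_list.append(scale_str[i])
--             i += 1
--     return scale_list
-- ===== SOURCE B (Python) =====
-- def str_to_scale_list(scale_str):
--     scale_list = []
--     for c in scale_str:
--         if c == '#' and scale_list and len(scale_list[-1]) == 1: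
--             scale_list[-1] += c
--         else:
--             scale_list.append(c)
--     return scale_list
-- ===== Notes on version B (the rewrite author's own statement) =====
-- stated objective: simpler
-- what changed: Replaced the index-stepping while-loop with one-character look-ahead by a single for-loop over characters that either merges a sharp sign into the previous one-character token or appends a new token.
import Mathlib
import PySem

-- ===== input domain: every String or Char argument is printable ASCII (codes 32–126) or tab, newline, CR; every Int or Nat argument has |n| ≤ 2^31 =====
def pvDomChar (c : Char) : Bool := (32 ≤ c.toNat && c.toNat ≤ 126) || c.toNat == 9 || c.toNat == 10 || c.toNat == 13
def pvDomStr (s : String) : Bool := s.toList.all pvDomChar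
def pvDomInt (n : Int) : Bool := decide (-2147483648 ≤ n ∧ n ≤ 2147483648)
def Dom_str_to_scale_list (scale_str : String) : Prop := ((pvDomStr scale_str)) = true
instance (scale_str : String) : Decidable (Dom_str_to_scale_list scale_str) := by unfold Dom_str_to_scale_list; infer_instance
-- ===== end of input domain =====

-- B replaces A's index-stepping look-ahead loop by a single for-loop that merges a '#'
-- into the previous one-character token; objective: simpler decomposition, same O(n) cost.

-- ===== PORT A =====
-- A's while-loop over index i: looks ahead at scale_str[i+1]; tokens are kept as List Char
-- (Python string slices) and turned into String at the end.
def pvAtokens : List Char → List (List Char)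
  | [] => []
  | [c] => [[c]]
  | c :: d :: rest =>
      if d = '#' then [c, '#'] :: pvAtokens rest
      else [c] :: pvAtokens (d :: rest)

def str_to_scale_list (scale_str : String) : List String :=
  (pvAtokens scale_str.toList).map String.ofList

-- ===== PORT B =====
-- B's single pass: accumulator holds the tokens in reverse (Python appends at the back,
-- mutating scale_list[-1]); tokens as List Char, turned into String at the end.
def pvBstep (acc : List (List Char)) (c : Char) : List (List Char) :=
  match acc with
  | t :: r => if c = '#' ∧ t.length = 1 then (t ++ ['#']) :: r else [c] :: t :: r
  | [] => [c] :: acc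

def str_to_scale_list_alt (scale_str : String) : List String :=
  ((scale_str.toList.foldl pvBstep []).reverse).map String.ofList

-- ===== PRECONDITION & SPEC =====
def Spec_str_to_scale_list (scale_str : String) (out : List String) : Prop := out = str_to_scale_list_alt scale_str
instance (scale_str : String) (out : List String) : Decidable (Spec_str_to_scale_list scale_str out) := by unfold Spec_str_to_scale_list; infer_instance

-- ===== CLAIM (what is proved, stated in full; the proofs are below) =====
def Claim_equal_str_to_scale_list : Prop := ∀ (scale_str : String), Dom_str_to_scale_list scale_str → Spec_str_to_scale_list scale_str (str_to_scale_list scale_str)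

-- ===== LEMMAS AND PROOFS =====

-- frame: tokens already finished below the working prefix are never touched,
-- provided the working prefix is nonempty (pvBstep only inspects the head).
theorem pvBstep_frame (l : List Char) (acc' acc : List (List Char)) (h : acc' ≠ []) :
    l.foldl pvBstep (acc' ++ acc) = l.foldl pvBstep acc' ++ acc := by
  induction l generalizing acc' with
  | nil => simp
  | cons c l ih =>
      obtain ⟨t, r, rfl⟩ : ∃ t r, acc' = t :: r := by
        cases acc' with
        | nil => exact absurd rfl h
        | cons t r => exact ⟨t, r, rfl⟩
      have hstep : pvBstep (t :: r ++ acc) c = pvBstep (t :: r) c ++ acc := by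
        simp only [List.cons_append, pvBstep]; split_ifs <;> simp
      rw [List.foldl_cons, List.foldl_cons, hstep]
      have hne : pvBstep (t :: r) c ≠ [] := by
        simp only [pvBstep]; split_ifs <;> simp
      exact ih _ hne

-- a blocked accumulator (head of length ≠ 1, e.g. a finished "x#") behaves like []
theorem pvBstep_blocked (l : List Char) (t : List Char) (r : List (List Char))
    (ht : t.length ≠ 1) : l.foldl pvBstep (t :: r) = l.foldl pvBstep [] ++ (t :: r) := by
  cases l with
  | nil => simp
  | cons c l =>
      have hstep : pvBstep (t :: r) c = [c] :: t :: r := by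
        simp only [pvBstep]; split_ifs with hc
        · exact absurd hc.2 ht
        · rfl
      rw [List.foldl_cons, hstep, List.foldl_cons,
        show ([c] :: t :: r) = [[c]] ++ (t :: r) from rfl,
        pvBstep_frame l [[c]] (t :: r) (by simp),
        show pvBstep [] c = [[c]] from rfl]

-- main invariant: B's reversed accumulator equals A's token list
theorem pvTokens_eq (l : List Char) : l.foldl pvBstep [] = (pvAtokens l).reverse := by
  induction l using pvAtokens.induct with
  | case1 => simp [pvAtokens]
  | case2 c => simp [pvAtokens, pvBstep]
  | case3 c rest ih =>
      have h2 : pvBstep [[c]] '#' = [[c, '#']] := by simp [pvBstep]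
      rw [List.foldl_cons, List.foldl_cons, show pvBstep [] c = [[c]] from rfl, h2,
        pvBstep_blocked rest [c, '#'] [] (by simp), ih]
      simp [pvAtokens]
  | case4 c d rest hd ih =>
      have h2 : pvBstep [[c]] d = [[d], [c]] := by
        simp only [pvBstep]; split_ifs with hc
        · exact absurd hc.1 hd
        · rfl
      rw [List.foldl_cons, List.foldl_cons, show pvBstep [] c = [[c]] from rfl, h2,
        show ([[d],[c]] : List (List Char)) = [[d]] ++ [[c]] from rfl,
        pvBstep_frame rest [[d]] [[c]] (by simp),
        show (rest.foldl pvBstep [[d]]) = ((d :: rest).foldl pvBstep []) from rfl,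
        ih]
      simp [pvAtokens, hd]

-- ===== VERDICT (by name: the statement is the Claim_ definition above) =====
theorem str_to_scale_list_spec : Claim_equal_str_to_scale_list := by
  intro s _
  unfold Spec_str_to_scale_list str_to_scale_list str_to_scale_list_alt
  rw [pvTokens_eq, List.reverse_reverse]
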